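-- pv_equiv track=rewrite | github.com/Harith-Y/AI-Playground | backend/app/services/experiment_config_service.py | _is_same_models
-- ===== SOURCE A (Python) =====
-- from typing import Dict, Any, Optional, List
--
-- def _is_same_models(
--
--     models1: List[Dict[str, Any]],
--     models2: List[Dict[str, Any]]
-- ) -> bool:
--     """Check if model configurations are identical."""
--     if len(models1) != len(models2):
--         return False
--
--     types1 = sorted([m["model_type"] for m in models1])
--     types2 = sorted([m["model_type"] for m in models2])
--
--     return types1 == types2
-- ===== SOURCE B (Python) =====
-- def _is_same_models(models1, models2):
--     """Check if model configurations are identical."""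
--     if len(models1) != len(models2):
--         return False
--
--     counts = {}
--     for m in models1:
--         t = m["model_type"]
--         counts[t] = counts.get(t, 0) + 1
--     for m in models2:
--         t = m["model_type"]
--         n = counts.get(t, 0)
--         if n == 0:
--             return False
--         counts[t] = n - 1
--     return True
-- ===== Notes on version B (the rewrite author's own statement) =====
-- stated objective: alternative
-- what changed: Replaces the two sort-and-compare passes by a single frequency table: one pass counts model types of models1 in a dict, a second pass decrements it over models2 with an early False on a missing/exhausted type.
import Mathlib
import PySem

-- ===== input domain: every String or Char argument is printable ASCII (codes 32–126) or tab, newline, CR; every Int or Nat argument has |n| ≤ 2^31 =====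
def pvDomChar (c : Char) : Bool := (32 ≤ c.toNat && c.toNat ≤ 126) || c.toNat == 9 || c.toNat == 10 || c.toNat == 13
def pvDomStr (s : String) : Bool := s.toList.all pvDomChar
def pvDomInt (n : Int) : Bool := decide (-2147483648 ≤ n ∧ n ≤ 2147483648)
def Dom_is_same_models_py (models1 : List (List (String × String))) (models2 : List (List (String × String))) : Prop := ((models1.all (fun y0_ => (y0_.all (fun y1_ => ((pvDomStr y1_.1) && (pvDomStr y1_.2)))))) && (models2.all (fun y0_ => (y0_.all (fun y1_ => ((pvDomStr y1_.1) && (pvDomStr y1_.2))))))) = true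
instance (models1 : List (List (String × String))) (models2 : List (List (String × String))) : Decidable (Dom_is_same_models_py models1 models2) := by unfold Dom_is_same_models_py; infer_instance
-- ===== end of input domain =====

-- B replaces A's two sorts with a one-pass frequency dict built over models1 and a decrementing
-- scan over models2 (alternative algorithm); return-value equivalence, no argument is mutated.

-- ===== PORT A =====
-- m["model_type"] (dict lookup = first match in the association list; "" never occurs under Pre_)
def pvType (m : List (String × String)) : String := (m.lookup "model_type").getD ""

def is_same_models_py (models1 : List (List (String × String))) (models2 : List (List (String × String))) : Bool :=
  if models1.length ≠ models2.length then false
  else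
    let types1 := PySem.List.sorted (models1.map pvType) (fun x => x) false
    let types2 := PySem.List.sorted (models2.map pvType) (fun x => x) false
    types1 == types2

-- ===== PORT B =====
-- the second loop of Source B: decrement the counter over models2, early False when a type is missing
def pvCheck (c : PySem.Dict String Int) : List (List (String × String)) → Bool
  | [] => true
  | m :: ms =>
    let t := pvType m
    let n := c.getD t 0
    if n == 0 then false
    else pvCheck (c.insert t (n - 1)) ms

def is_same_models_py_alt (models1 : List (List (String × String))) (models2 : List (List (String × String))) : Bool :=
  if models1.length ≠ models2.length then false
  else
    let counts := models1.foldl (fun c m => c.modify (pvType m) 0 (· + 1)) PySem.Dict.empty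
    pvCheck counts models2

-- ===== PRECONDITION & SPEC =====
-- Pre_ excludes only inputs where Python A raises KeyError: equal-length lists in which some
-- dict lacks the key "model_type" (B raises there too).
def Pre_is_same_models_py (models1 : List (List (String × String))) (models2 : List (List (String × String))) : Prop :=
  models1.length ≠ models2.length ∨
    ((models1.all (fun m => m.any (fun p => p.1 == "model_type"))) = true ∧
     (models2.all (fun m => m.any (fun p => p.1 == "model_type"))) = true)
instance (models1 : List (List (String × String))) (models2 : List (List (String × String))) : Decidable (Pre_is_same_models_py models1 models2) := by unfold Pre_is_same_models_py; infer_instance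

def pvWitness_is_same_models_py : (List (List (String × String))) × (List (List (String × String))) :=
  ([[("model_type", "linear")]], [[("model_type", "linear")]])

def Spec_is_same_models_py (models1 : List (List (String × String))) (models2 : List (List (String × String))) (out : Bool) : Prop := out = is_same_models_py_alt models1 models2
instance (models1 : List (List (String × String))) (models2 : List (List (String × String))) (out : Bool) : Decidable (Spec_is_same_models_py models1 models2 out) := by unfold Spec_is_same_models_py; infer_instance

-- ===== CLAIM (what is proved, stated in full; the proofs are below) =====
def Claim_equal_is_same_models_py : Prop := ∀ (models1 : List (List (String × String))) (models2 : List (List (String × String))), Dom_is_same_models_py models1 models2 → Pre_is_same_models_py models1 models2 → Spec_is_same_models_py models1 models2 (is_same_models_py models1 models2)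

-- ===== LEMMAS AND PROOFS =====

-- the decrementing scan succeeds iff every type occurs in r at least as often as in ms
theorem pvCheck_iff (ms : List (List (String × String))) (c : PySem.Dict String Int)
    (r : List String) (h : ∀ t, c.getD t 0 = (r.count t : Int)) :
    pvCheck c ms = true ↔ ∀ t, (ms.map pvType).count t ≤ r.count t := by
  induction ms generalizing c r with
  | nil => simp [pvCheck]
  | cons m ms ih =>
    have hm := h (pvType m)
    have hc : ∀ t, ((m :: ms).map pvType).count t
        = (ms.map pvType).count t + (if pvType m = t then 1 else 0) := by
      intro t; simp [List.count_cons]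
    by_cases h0 : r.count (pvType m) = 0
    · have hz : c.getD (pvType m) 0 = 0 := by omega
      constructor
      · intro hcheck; simp [pvCheck, hz] at hcheck
      · intro hall
        have h2 := hall (pvType m)
        rw [hc] at h2
        simp at h2
        omega
    · have hne : (c.getD (pvType m) 0 == 0) = false := by simp [hm]; omega
      have step : pvCheck c (m :: ms) = pvCheck (c.insert (pvType m) (c.getD (pvType m) 0 - 1)) ms := by
        simp [pvCheck, hne]
      rw [step, ih _ (r.erase (pvType m)) ?_]
      · constructor
        · intro hall t
          have h2 := hall t
          rw [hc]
          by_cases ht : pvType m = t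
          · subst ht
            rw [List.count_erase_self] at h2
            simp
            omega
          · rw [List.count_erase_of_ne (Ne.symm ht)] at h2
            rw [if_neg ht]
            omega
        · intro hall t
          have h2 := hall t
          rw [hc] at h2
          by_cases ht : pvType m = t
          · subst ht
            rw [List.count_erase_self]
            simp at h2
            omega
          · rw [List.count_erase_of_ne (Ne.symm ht)]
            rw [if_neg ht] at h2
            omega
      · intro t
        rw [PySem.Dict.getD_insert]
        by_cases ht : t = pvType m
        · subst ht
          rw [if_pos rfl, List.count_erase_self, hm]
          omega
        · rw [if_neg ht, List.count_erase_of_ne ht]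
          exact h t

-- the counting loop of Source B is a counter of the mapped type list
theorem pvCounts_getD (models1 : List (List (String × String))) (t : String) :
    (models1.foldl (fun c m => c.modify (pvType m) 0 (· + 1)) PySem.Dict.empty).getD t 0
      = ((models1.map pvType).count t : Int) := by
  have he : models1.foldl (fun c m => c.modify (pvType m) 0 (· + 1)) PySem.Dict.empty
      = (models1.map pvType).foldl (fun (c : PySem.Dict String Int) x => c.modify x 0 (· + 1)) PySem.Dict.empty :=
    (List.foldl_map (f := pvType) (g := fun (c : PySem.Dict String Int) x => c.modify x 0 (· + 1))).symm
  rw [he, PySem.Dict.getD_foldl_modify_add_one]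
  simp

-- ===== VERDICT (by name: the statement is the Claim_ definition above) =====
theorem is_same_models_py_spec : Claim_equal_is_same_models_py := by
  intro models1 models2 _ _
  unfold Spec_is_same_models_py is_same_models_py is_same_models_py_alt
  by_cases hlen : models1.length ≠ models2.length
  · simp [hlen]
  · simp only [hlen, if_false]
    have hlen2 : models1.length = models2.length := not_ne_iff.mp hlen
    set T1 := models1.map pvType with hT1
    set T2 := models2.map pvType with hT2
    have hlen' : T1.length = T2.length := by simp [hT1, hT2, hlen2]
    have hb := pvCheck_iff models2 _ T1 (pvCounts_getD models1)
    by_cases hperm : T1.Perm T2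
    · have hA : (PySem.List.sorted T1 (fun x => x) false == PySem.List.sorted T2 (fun x => x) false) = true := by
        simp only [beq_iff_eq]
        exact (PySem.List.sorted_id_eq_sorted_id_iff_perm T1 T2).mpr hperm
      have hB : pvCheck (models1.foldl (fun c m => c.modify (pvType m) 0 (· + 1)) PySem.Dict.empty) models2 = true := by
        rw [hb]
        intro t
        exact le_of_eq (hperm.count_eq t).symm
      rw [hA, hB]
    · have hA : (PySem.List.sorted T1 (fun x => x) false == PySem.List.sorted T2 (fun x => x) false) = false := by
        simp only [beq_eq_false_iff_ne, ne_eq]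
        intro h
        exact hperm ((PySem.List.sorted_id_eq_sorted_id_iff_perm T1 T2).mp h)
      have hB : pvCheck (models1.foldl (fun c m => c.modify (pvType m) 0 (· + 1)) PySem.Dict.empty) models2 = false := by
        rw [Bool.eq_false_iff, ne_eq, hb]
        intro hall
        apply hperm
        have hsub : T2.Subperm T1 := List.subperm_ext_iff.mpr (fun x _ => hall x)
        exact (hsub.perm_of_length_le (le_of_eq hlen')).symm
      rw [hA, hB]
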